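-- pv_equiv track=rewrite | github.com/python-workshop/fsdse-python-assignment-194 | build.py | sub_two
-- ===== SOURCE A (Python) =====
-- def sub_two(a, b):
--     if a is None or b is None:
--         raise TypeError('a or b cannot be None')
--
--     if abs(a) < abs(b):
--         raise ValueError("Initial number should be greater")
--
--     result = a ^ b
--     borrow = (~a & b) << 1
--     if borrow != 0:
--         return sub_two(result, borrow)
--     return result
-- ===== SOURCE B (Python) =====
-- def sub_two(a, b):
--     if a is None or b is None:
--         raise TypeError('a or b cannot be None')
--     if abs(a) < abs(b):
--         raise ValueError("Initial number should be greater")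
--     return a - b
-- ===== Notes on version B (the rewrite author's own statement) =====
-- stated objective: simpler
-- what changed: replaces the recursive XOR/borrow bit-manipulation loop by the closed-form integer subtraction a - b after the same entry guards; Pre_ is exactly the set of inputs on which A returns (elsewhere A raises ValueError, at entry or mid-recursion).
import Mathlib
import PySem

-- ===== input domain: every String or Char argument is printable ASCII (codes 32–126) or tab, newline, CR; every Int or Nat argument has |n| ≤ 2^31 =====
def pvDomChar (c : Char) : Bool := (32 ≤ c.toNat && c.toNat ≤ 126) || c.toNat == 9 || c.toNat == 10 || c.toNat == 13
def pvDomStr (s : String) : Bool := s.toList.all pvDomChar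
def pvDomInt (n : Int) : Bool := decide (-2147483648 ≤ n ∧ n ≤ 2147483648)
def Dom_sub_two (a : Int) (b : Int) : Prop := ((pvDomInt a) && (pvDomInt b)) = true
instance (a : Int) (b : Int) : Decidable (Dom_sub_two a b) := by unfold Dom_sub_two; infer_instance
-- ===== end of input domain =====

-- B replaces A's recursive XOR/borrow bit loop by the closed-form subtraction a - b
-- after the same entry guard; Pre_sub_two is exactly the set of inputs on which A
-- returns (everywhere else A raises ValueError, at entry or mid-recursion).

-- ===== PORT A =====
-- Literal port of A's recursion; fuel makes it total (inside Pre_ the recursion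
-- depth is at most 40, proved below, so fuel 40 is never exhausted there).
-- The 'a is None' TypeError guard cannot fire for Int arguments and has no Lean image;
-- the 'abs(a) < abs(b)' ValueError branch returns a junk value 0, excluded by Pre_.
def sub_two_go : Nat → Int → Int → Int
  | 0, _, _ => 0
  | Nat.succ n, a, b =>
    if a.natAbs < b.natAbs then 0
    else
      let result := PySem.Int.bxor a b
      let borrow := (PySem.Int.band (Int.not a) b) <<< (1 : Nat)
      if borrow ≠ 0 then sub_two_go n result borrow else result

def sub_two (a : Int) (b : Int) : Int := sub_two_go 40 a b

-- ===== PORT B =====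
-- B keeps A's entry guard (its ValueError branch yields the junk value 0, outside Pre_)
-- and replaces the whole bit recursion by the closed-form difference.
def sub_two_alt (a : Int) (b : Int) : Int :=
  if a.natAbs < b.natAbs then 0 else a - b

-- ===== PRECONDITION & SPEC =====
-- Pre_ is EXACTLY the set of inputs on which A returns without raising:
-- (i) 0 ≤ b ≤ a (the whole nonnegative region); (ii) b's two's-complement bits lie
-- inside a's (borrow 0: one step) with |b| ≤ |a|; (iii) a < 0 with -a not a power of
-- two, 0 ≤ b and b - a ≤ 2^(⌊log2(-a)⌋+1) (the guarded borrow loop reaches 0).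
-- Outside Pre_ A raises ValueError (at entry or mid-recursion); nothing is excluded
-- on which A returns.
def Pre_sub_two (a : Int) (b : Int) : Prop :=
  (0 ≤ b ∧ b ≤ a) ∨
  (PySem.Int.band (Int.not a) b = 0 ∧ b.natAbs ≤ a.natAbs) ∨
  (a < 0 ∧ 0 ≤ b ∧ 2 ^ ((-a).toNat.log2) < -a ∧ b - a ≤ 2 ^ ((-a).toNat.log2 + 1))
instance (a : Int) (b : Int) : Decidable (Pre_sub_two a b) := by unfold Pre_sub_two; infer_instance

def pvWitness_sub_two : Int × Int := (5, 3)

def Spec_sub_two (a : Int) (b : Int) (out : Int) : Prop := out = sub_two_alt a b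
instance (a : Int) (b : Int) (out : Int) : Decidable (Spec_sub_two a b out) := by unfold Spec_sub_two; infer_instance

-- ===== CLAIM (what is proved, stated in full; the proofs are below) =====
def Claim_equal_sub_two : Prop := ∀ (a : Int) (b : Int), Dom_sub_two a b → Pre_sub_two a b → Spec_sub_two a b (sub_two a b)

-- ===== LEMMAS AND PROOFS =====

-- The classic ripple identity: x + y = (x ^^^ y) + 2 * (x &&& y).
theorem pv_xor_add_two_mul_and (x : Nat) : ∀ y : Nat, (x ^^^ y) + 2 * (x &&& y) = x + y := by
  induction x using Nat.binaryRec with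
  | zero => simp
  | bit a m ih =>
    intro y
    induction y using Nat.binaryRec with
    | zero => simp
    | bit b n _ =>
      have h := ih n
      rw [Nat.xor_bit, Nat.land_bit]
      cases a <;> cases b <;> simp [Nat.bit] <;> omega

-- A power of two dividing x divides x &&& y (the low zero bits survive the AND).
theorem pv_pow_dvd_and (k : Nat) : ∀ x y : Nat, 2 ^ k ∣ x → 2 ^ k ∣ x &&& y := by
  induction k with
  | zero => intro x y _; simp
  | succ k ih =>
    intro x y hx
    induction x using Nat.binaryRec with
    | zero => simp
    | bit a m _ =>
      induction y using Nat.binaryRec with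
      | zero => simp
      | bit b n _ =>
        rw [Nat.land_bit]
        rcases hx with ⟨c, hc⟩
        have he : (2 : Nat) ^ (k + 1) * c = 2 * (2 ^ k * c) := by ring
        rw [he] at hc
        have ha : a = false := by
          cases a
          · rfl
          · exfalso; simp [Nat.bit] at hc; omega
        subst ha
        have hm : 2 ^ k ∣ m := ⟨c, by simp [Nat.bit] at hc; omega⟩
        rcases ih m n hm with ⟨d, hd⟩
        refine ⟨d, ?_⟩
        have he2 : (2 : Nat) ^ (k + 1) * d = 2 * (2 ^ k * d) := by ring
        rw [he2, ← hd]
        simp [Nat.bit]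

theorem pv_int_not (a : Int) : Int.not a = -a - 1 := by
  cases a <;> simp [Int.not, Int.negSucc_eq] <;> omega

-- band (~a) b for 0 ≤ a, 0 ≤ b, read off PySem.Int.band's definition.
theorem pv_band_not (a b : Int) (ha : 0 ≤ a) (hb : 0 ≤ b) :
    PySem.Int.band (Int.not a) b = ((b.toNat - (b.toNat &&& a.toNat) : Nat) : Int) := by
  rw [pv_int_not]
  simp only [PySem.Int.band]
  rw [if_neg (by omega), if_pos hb]
  norm_num

-- One step of the loop plus induction: inside the nonnegative region the
-- fueled recursion computes a - b as long as 2^(32-n) divides b.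
theorem pv_go_correct (n : Nat) : ∀ a b : Int, 0 ≤ b → b ≤ a → a.natAbs < 2 ^ 32 →
    2 ^ (32 - n) ∣ b.toNat → sub_two_go (n + 1) a b = a - b := by
  induction n with
  | zero =>
    intro a b hb hba ha hdvd
    have hb0 : b = 0 := by
      rcases hdvd with ⟨c, hc⟩
      have h32 : (2 : Nat) ^ (32 - 0) = 4294967296 := by norm_num
      rw [h32] at hc
      omega
    subst hb0
    simp [sub_two_go]
  | succ n ih =>
    intro a b hb hba ha hdvd
    by_cases hb0 : b = 0
    · subst hb0; simp [sub_two_go]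
    · have ha0 : 0 ≤ a := le_trans hb hba
      have hguard : ¬ a.natAbs < b.natAbs := by
        simp only [not_lt]; omega
      have hxor : PySem.Int.bxor a b = ((a.toNat ^^^ b.toNat : Nat) : Int) :=
        PySem.Int.bxor_of_nonneg ha0 hb
      have hband := pv_band_not a b ha0 hb
      have hle : b.toNat &&& a.toNat ≤ b.toNat := Nat.and_le_left
      have hid := pv_xor_add_two_mul_and a.toNat b.toNat
      have hcomm : a.toNat &&& b.toNat = b.toNat &&& a.toNat := Nat.and_comm _ _
      set rn : Nat := a.toNat ^^^ b.toNat with hrn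
      set cn : Nat := b.toNat - (b.toNat &&& a.toNat) with hcn
      have hshift : (PySem.Int.band (Int.not a) b) <<< (1 : Nat) = ((2 * cn : Nat) : Int) := by
        rw [hband, Int.shiftLeft_eq]; push_cast; ring
      have hinv : (rn : Int) - (2 * cn : Nat) = a - b := by
        have h1 : (a.toNat : Int) = a := Int.toNat_of_nonneg ha0
        have h2 : (b.toNat : Int) = b := Int.toNat_of_nonneg hb
        push_cast [hrn, hcn, Nat.cast_sub hle]
        omega
      show sub_two_go (n + 1 + 1) a b = a - b
      rw [sub_two_go]
      simp only [if_neg hguard, hxor, hshift]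
      by_cases hc0 : ((2 * cn : Nat) : Int) = 0
      · rw [if_neg (by simp [hc0])]
        omega
      · rw [if_pos hc0]
        have hble : ((2 * cn : Nat) : Int) ≤ (rn : Int) := by omega
        have hrlt : ((rn : Int)).natAbs < 2 ^ 32 := by
          have h1 : a.toNat < 2 ^ 32 := by omega
          have h2 : b.toNat < 2 ^ 32 := by omega
          have := Nat.xor_lt_two_pow h1 h2
          simpa [hrn] using this
        have hdvd' : 2 ^ (32 - n) ∣ ((2 * cn : Nat) : Int).toNat := by
          rw [Int.toNat_natCast]
          have hdand : 2 ^ (32 - (n + 1)) ∣ b.toNat &&& a.toNat :=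
            pv_pow_dvd_and (32 - (n + 1)) b.toNat a.toNat hdvd
          have hd1 : 2 ^ (32 - (n + 1)) ∣ cn := Nat.dvd_sub hdvd hdand
          rcases hd1 with ⟨c, hc⟩
          by_cases hn : n ≤ 31
          · have he : 32 - n = (32 - (n + 1)) + 1 := by omega
            rw [he, pow_succ]
            exact ⟨c, by rw [hc]; ring⟩
          · have h0 : 32 - n = 0 := by omega
            rw [h0]
            exact Nat.one_dvd _
        have hrec := ih ((rn : Nat) : Int) ((2 * cn : Nat) : Int)
          (Int.natCast_nonneg _) hble hrlt hdvd'
        rw [hrec]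
        omega

-- When b's bits lie inside a's (band (~a) b = 0), a ^ b is already a - b.
theorem pv_bxor_eq_sub (a b : Int) (h : PySem.Int.band (Int.not a) b = 0) :
    PySem.Int.bxor a b = a - b := by
  by_cases ha : 0 ≤ a <;> by_cases hb : 0 ≤ b
  · rw [pv_band_not a b ha hb] at h
    have hle : b.toNat &&& a.toNat ≤ b.toNat := Nat.and_le_left
    have heq : b.toNat &&& a.toNat = b.toNat := by
      have : (b.toNat - (b.toNat &&& a.toNat) : Nat) = 0 := by exact_mod_cast h
      omega
    have hid := pv_xor_add_two_mul_and a.toNat b.toNat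
    rw [Nat.and_comm] at hid
    have hba : b.toNat ≤ a.toNat := heq ▸ Nat.and_le_right
    rw [PySem.Int.bxor_of_nonneg ha hb]
    have h1 : (a.toNat : Int) = a := Int.toNat_of_nonneg ha
    have h2 : (b.toNat : Int) = b := Int.toNat_of_nonneg hb
    have : (a.toNat ^^^ b.toNat : Nat) = a.toNat - b.toNat := by omega
    rw [this]; push_cast [Nat.cast_sub hba]; omega
  · exfalso
    rw [pv_int_not] at h
    simp only [PySem.Int.band] at h
    rw [if_neg (by omega), if_neg hb] at h
    omega
  · rw [pv_int_not] at h
    have hna : 0 ≤ -a - 1 := by omega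
    rw [PySem.Int.band_of_nonneg hna hb] at h
    have h0 : (-a - 1).toNat &&& b.toNat = 0 := by exact_mod_cast h
    have hid := pv_xor_add_two_mul_and (-a - 1).toNat b.toNat
    rw [h0] at hid
    simp only [PySem.Int.bxor]
    rw [if_neg (by omega), if_pos hb]
    have h1 : ((-a - 1).toNat : Int) = -a - 1 := Int.toNat_of_nonneg hna
    have h2 : (b.toNat : Int) = b := Int.toNat_of_nonneg hb
    have h3 : ((-a - 1).toNat ^^^ b.toNat : Nat) = (-a - 1).toNat + b.toNat := by omega
    rw [h3]; push_cast; omega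
  · rw [pv_int_not] at h
    simp only [PySem.Int.band] at h
    rw [if_pos (by omega), if_neg hb] at h
    have hle : (-a - 1).toNat &&& (-b - 1).toNat ≤ (-a - 1).toNat := Nat.and_le_left
    have heq : (-a - 1).toNat &&& (-b - 1).toNat = (-a - 1).toNat := by
      have : ((-a - 1).toNat - ((-a - 1).toNat &&& (-b - 1).toNat) : Nat) = 0 := by exact_mod_cast h
      omega
    have hid := pv_xor_add_two_mul_and (-a - 1).toNat (-b - 1).toNat
    rw [heq] at hid
    have hab : (-a - 1).toNat ≤ (-b - 1).toNat := heq ▸ Nat.and_le_right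
    simp only [PySem.Int.bxor]
    rw [if_neg (by omega), if_neg hb]
    have h1 : ((-a - 1).toNat : Int) = -a - 1 := Int.toNat_of_nonneg (by omega)
    have h2 : ((-b - 1).toNat : Int) = -b - 1 := Int.toNat_of_nonneg (by omega)
    have h3 : ((-a - 1).toNat ^^^ (-b - 1).toNat : Nat) = (-b - 1).toNat - (-a - 1).toNat := by omega
    rw [h3]; push_cast [Nat.cast_sub hab]; omega

-- bxor of a negative and a nonnegative, read off the definition.
theorem pv_bxor_neg_nonneg (m : Nat) (b : Int) (hb : 0 ≤ b) :
    PySem.Int.bxor (-(m + 1 : Int)) b = -(((m ^^^ b.toNat : Nat) : Int) + 1) := by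
  simp only [PySem.Int.bxor]
  rw [if_neg (by omega), if_pos hb]
  have h1 : (-(-(m + 1 : Int)) - 1) = (m : Int) := by omega
  rw [h1, Int.toNat_natCast]; ring

-- 2^j &&& x = 0 when x < 2^j.
theorem pv_two_pow_and_eq_zero (j x : Nat) (hx : x < 2 ^ j) : 2 ^ j &&& x = 0 := by
  have hid := pv_xor_add_two_mul_and (2 ^ j) x
  have hxor : 2 ^ j ^^^ x < 2 ^ (j + 1) :=
    Nat.xor_lt_two_pow (by rw [pow_succ]; omega) (by rw [pow_succ]; omega)
  have hbits : ∀ i, (2 ^ j &&& x).testBit i = false := by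
    intro i
    rw [Nat.testBit_and, Nat.testBit_two_pow]
    by_cases hij : j = i
    · subst hij
      have hti : x.testBit j = false := by
        apply Nat.testBit_eq_false_of_lt
        calc x < 2 ^ j := hx
        _ ≤ 2 ^ j * 2 ^ 0 := by simp
        _ ≤ _ := by rw [← pow_add]; exact Nat.pow_le_pow_right (by norm_num) (by omega)
      simp [hti]
    · simp [hij]
  apply Nat.eq_of_testBit_eq
  intro i
  simp [hbits i]

-- (2^j + x) ^^^ y = 2^j + (x ^^^ y) for x, y < 2^j.
theorem pv_xor_high_bit (j x y : Nat) (hx : x < 2 ^ j) (hy : y < 2 ^ j) :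
    (2 ^ j + x) ^^^ y = 2 ^ j + (x ^^^ y) := by
  have hadd : ∀ z, z < 2 ^ j → 2 ^ j ^^^ z = 2 ^ j + z := by
    intro z hz
    have hid := pv_xor_add_two_mul_and (2 ^ j) z
    rw [pv_two_pow_and_eq_zero j z hz] at hid
    omega
  have hxy : x ^^^ y < 2 ^ j := Nat.xor_lt_two_pow hx hy
  rw [← hadd x hx, Nat.xor_assoc, hadd (x ^^^ y) hxy]

-- The negative-a region: a = -(m+1) with the top bit 2^j set in m and the total
-- m + b below 2^(j+1); the guarded borrow loop then reaches 0 and returns a - b.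
theorem pv_go_neg (n : Nat) : ∀ (j m bn : Nat), 2 ^ j ≤ m → m + bn < 2 ^ (j + 1) →
    2 ^ (j + 1 - n) ∣ bn → sub_two_go (n + 1) (-(m + 1 : Int)) (bn : Int) = -(m + 1 : Int) - bn := by
  induction n with
  | zero =>
    intro j m bn hjm hs hdvd
    have hd' : 2 ^ (j + 1) ∣ bn := by simpa using hdvd
    have hb0 : bn = 0 := by
      by_contra hne
      have := Nat.le_of_dvd (Nat.pos_of_ne_zero hne) hd'
      omega
    subst hb0
    simp [sub_two_go]
  | succ n ih =>
    intro j m bn hjm hs hdvd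
    by_cases hb0 : bn = 0
    · subst hb0; simp [sub_two_go]
    · have hblt : bn < 2 ^ j := by
        have : (2 : Nat) ^ (j + 1) = 2 ^ j + 2 ^ j := by rw [pow_succ]; omega
        omega
      have hguard : ¬ ((-(m + 1 : Int)).natAbs < ((bn : Int)).natAbs) := by
        simp only [not_lt]
        omega
      have hxor := pv_bxor_neg_nonneg m (bn : Int) (Int.natCast_nonneg _)
      rw [Int.toNat_natCast] at hxor
      have hnot : Int.not (-(m + 1 : Int)) = (m : Int) := by rw [pv_int_not]; omega
      have hband : PySem.Int.band (Int.not (-(m + 1 : Int))) (bn : Int)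
          = ((m &&& bn : Nat) : Int) := by
        rw [hnot, PySem.Int.band_natCast]
      have hshift : (((m &&& bn : Nat) : Int)) <<< (1 : Nat) = ((2 * (m &&& bn) : Nat) : Int) := by
        rw [Int.shiftLeft_eq]; push_cast; ring
      have hid := pv_xor_add_two_mul_and m bn
      show sub_two_go (n + 1 + 1) (-(m + 1 : Int)) (bn : Int) = _
      rw [sub_two_go]
      simp only [if_neg hguard, hxor, hband, hshift]
      by_cases hc0 : ((2 * (m &&& bn) : Nat) : Int) = 0
      · rw [if_neg (by simp [hc0])]
        have hand0 : m &&& bn = 0 := by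
          have : (2 * (m &&& bn) : Nat) = 0 := by exact_mod_cast hc0
          omega
        rw [hand0] at hid
        have : (m ^^^ bn) = m + bn := by omega
        rw [this]; push_cast; ring
      · rw [if_pos hc0]
        -- set up the recursive call: m' = m ^^^ bn, b' = 2 * (m &&& bn)
        set m0 : Nat := m - 2 ^ j with hm0
        have hm0lt : m0 < 2 ^ j := by
          have : (2 : Nat) ^ (j + 1) = 2 ^ j + 2 ^ j := by rw [pow_succ]; omega
          omega
        have hmeq : m = 2 ^ j + m0 := by omega
        have hm' : m ^^^ bn = 2 ^ j + (m0 ^^^ bn) := by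
          rw [hmeq]; exact pv_xor_high_bit j m0 bn hm0lt hblt
        have hjm' : 2 ^ j ≤ m ^^^ bn := by omega
        have hs' : (m ^^^ bn) + 2 * (m &&& bn) < 2 ^ (j + 1) := by omega
        have hdvd' : 2 ^ (j + 1 - n) ∣ 2 * (m &&& bn) := by
          have hstep : 2 ^ (j + 1 - (n + 1)) ∣ bn := hdvd
          have hd1 : 2 ^ (j + 1 - (n + 1)) ∣ m &&& bn := by
            rw [Nat.and_comm]
            exact pv_pow_dvd_and _ bn m hstep
          rcases hd1 with ⟨c, hc⟩
          by_cases hn : n ≤ j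
          · have he : j + 1 - n = (j + 1 - (n + 1)) + 1 := by omega
            rw [he, pow_succ]
            exact ⟨c, by rw [hc]; ring⟩
          · have h0 : j + 1 - n = 0 := by omega
            rw [h0]; exact Nat.one_dvd _
        have hrec := ih j (m ^^^ bn) (2 * (m &&& bn)) hjm' hs' hdvd'
        have hcastm : -(((m ^^^ bn : Nat) : Int) + 1) = -(((m ^^^ bn : Nat) : Int) + 1) := rfl
        -- align the recursive call's arguments
        have : sub_two_go (n + 1) (-(((m ^^^ bn : Nat) : Int) + 1)) (((2 * (m &&& bn) : Nat) : Int))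
            = -(((m ^^^ bn : Nat) : Int) + 1) - ((2 * (m &&& bn) : Nat) : Int) := hrec
        rw [this]
        push_cast
        omega

-- ===== VERDICT (by name: the statement is the Claim_ definition above) =====
theorem sub_two_spec : Claim_equal_sub_two := by
  intro a b hdom hpre
  unfold Spec_sub_two sub_two_alt
  have hdomab : a.natAbs ≤ 2 ^ 31 ∧ b.natAbs ≤ 2 ^ 31 := by
    unfold Dom_sub_two at hdom
    simp only [pvDomInt, Bool.and_eq_true, decide_eq_true_eq] at hdom
    constructor <;> omega
  rcases hpre with ⟨hb, hba⟩ | ⟨hband, hle⟩ | ⟨ha, hb, hpow, hrange⟩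
  · rw [if_neg (by omega)]
    have := pv_go_correct 39 a b hb hba (by omega) (by simp)
    simpa [sub_two] using this
  · rw [if_neg (by omega)]
    unfold sub_two
    rw [sub_two_go]
    rw [if_neg (by omega)]
    simp only [hband]
    norm_num
    exact pv_bxor_eq_sub a b hband
  · -- negative-a region: a = -(m+1), m = (-a).toNat - 1, j = log2 (-a).toNat
    set nn : Nat := (-a).toNat with hnn
    have hnpos : 0 < nn := by omega
    set j : Nat := nn.log2 with hj
    have hna : (nn : Int) = -a := Int.toNat_of_nonneg (by omega)
    have hjlt : 2 ^ j < nn := by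
      have h2 : ((2 : Int) ^ j) < (nn : Int) := by rw [hna]; exact_mod_cast hpow
      exact_mod_cast h2
    have hnlt : nn < 2 ^ (j + 1) := Nat.lt_log2_self
    set m : Nat := nn - 1 with hm
    have hjm : 2 ^ j ≤ m := by omega
    have haeq : a = -(m + 1 : Int) := by omega
    have hbeq : b = ((b.toNat : Nat) : Int) := (Int.toNat_of_nonneg hb).symm
    have hs : m + b.toNat < 2 ^ (j + 1) := by
      have : (b.toNat : Int) = b := Int.toNat_of_nonneg hb
      have h2 : ((2 : Int) ^ (j + 1)) = ((2 ^ (j + 1) : Nat) : Int) := by push_cast; ring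
      have hr : b + nn ≤ 2 ^ (j + 1) := by
        have hna : ((-a).toNat : Int) = -a := Int.toNat_of_nonneg (by omega)
        omega
      omega
    have hjle : j + 1 ≤ 39 := by
      have : nn ≤ 2 ^ 31 := by omega
      have hlog : j < 39 := by
        rw [hj, Nat.log2_lt (by omega)]
        calc nn ≤ 2 ^ 31 := this
        _ < 2 ^ 39 := by norm_num
      omega
    have hdvd : 2 ^ (j + 1 - 39) ∣ b.toNat := by
      have h0 : j + 1 - 39 = 0 := by omega
      rw [h0]; exact Nat.one_dvd _
    have hgo := pv_go_neg 39 j m b.toNat hjm hs hdvd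
    have hguardB : ¬ (a.natAbs < b.natAbs) := by
      have h1 : a.natAbs = m + 1 := by omega
      have h2 : b.natAbs = b.toNat := by omega
      have hbj : b.toNat < 2 ^ j := by
        have : (2 : Nat) ^ (j + 1) = 2 ^ j + 2 ^ j := by rw [pow_succ]; omega
        omega
      omega
    rw [if_neg hguardB]
    unfold sub_two
    rw [haeq, hbeq]
    have h39 : (39 : Nat) + 1 = 40 := rfl
    rw [← h39]
    rw [hgo]
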